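-- pv_equiv track=rewrite | github.com/chinedu-2002/tip101 | class_work/week_2_dict/unit2_s2_problem3.py | find_min_index_of_repeating
-- ===== SOURCE A (Python) =====
-- def find_min_index_of_repeating(nums):
--     dict = {}
--     min_index = None
--
--     for i in range(len(nums)):
--         if nums[i] not in dict:
--             dict[nums[i]] = i
--         else:
--             first_index = dict[nums[i]]
--             if min_index is None:
--                 min_index = first_index
--             else:
--                 min_index = min(min_index, first_index)
--     return min_index
-- ===== SOURCE B (Python) =====
-- def find_min_index_of_repeating(nums):
--     count = {}
--     for x in nums:
--         count[x] = count.get(x, 0) + 1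
--     for i, x in enumerate(nums):
--         if count[x] > 1:
--             return i
--     return None
-- ===== Notes on version B (the rewrite author's own statement) =====
-- stated objective: alternative
-- what changed: B builds a full frequency table in one pass and then scans for the first index whose element occurs more than once, instead of A's single pass that records first-occurrence indices in a dict and maintains a running minimum over them.
import Mathlib
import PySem

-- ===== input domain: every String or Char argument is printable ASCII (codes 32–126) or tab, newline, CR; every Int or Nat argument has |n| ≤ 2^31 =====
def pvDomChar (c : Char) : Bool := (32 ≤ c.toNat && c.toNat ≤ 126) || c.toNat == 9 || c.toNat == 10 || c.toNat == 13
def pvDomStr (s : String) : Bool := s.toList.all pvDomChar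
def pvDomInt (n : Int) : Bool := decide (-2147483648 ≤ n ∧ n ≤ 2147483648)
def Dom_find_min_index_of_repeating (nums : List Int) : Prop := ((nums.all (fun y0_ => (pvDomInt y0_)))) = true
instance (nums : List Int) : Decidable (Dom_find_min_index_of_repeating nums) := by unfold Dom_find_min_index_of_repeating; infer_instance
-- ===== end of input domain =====

-- B replaces A's running minimum over a dict of first-occurrence indices by a frequency
-- table plus a scan for the first index whose element repeats; return values proved equal.

-- ===== PORT A =====
-- one loop iteration of A ('for i in range(len(nums)): …'); state = (dict, min_index)
def pvStepA (nums : List Int) (st : PySem.Dict Int Int × Option Int) (i : Int) :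
    PySem.Dict Int Int × Option Int :=
  let x := PySem.List.pyGetD nums i 0
  if st.1.contains x = false then
    (st.1.insert x i, st.2)
  else
    -- dict[nums[i]]: the key is present in this branch, so getD's default is never used
    let first_index := st.1.getD x 0
    match st.2 with
    | none => (st.1, some first_index)
    | some m => (st.1, some (min m first_index))

def find_min_index_of_repeating (nums : List Int) : Option Int :=
  ((PySem.List.pyRange 0 (PySem.List.len nums) 1).foldl (pvStepA nums)
    (PySem.Dict.empty, none)).2

-- ===== PORT B =====
def find_min_index_of_repeating_alt (nums : List Int) : Option Int :=
  let count := nums.foldl (fun d x => d.insert x (d.getD x 0 + 1))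
    (PySem.Dict.empty : PySem.Dict Int Int)
  (PySem.List.enumerate nums).findSome?
    (fun p => if count.getD p.2 0 > 1 then some p.1 else none)

-- ===== PRECONDITION & SPEC =====
def Spec_find_min_index_of_repeating (nums : List Int) (out : Option Int) : Prop := out = find_min_index_of_repeating_alt nums
instance (nums : List Int) (out : Option Int) : Decidable (Spec_find_min_index_of_repeating nums out) := by unfold Spec_find_min_index_of_repeating; infer_instance

-- ===== CLAIM (what is proved, stated in full; the proofs are below) =====
def Claim_equal_find_min_index_of_repeating : Prop := ∀ (nums : List Int), Dom_find_min_index_of_repeating nums → Spec_find_min_index_of_repeating nums (find_min_index_of_repeating nums)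

-- ===== LEMMAS AND PROOFS =====

-- A's loop-state accumulator for min_index
def optMin (m : Option Int) (x : Int) : Option Int :=
  match m with
  | none => some x
  | some mv => some (min mv x)

-- the first-occurrence indices (as recorded by A's dict) of the duplicates seen in nums.take k
def dupIdxs (nums : List Int) (k : Nat) : List Int :=
  (List.range k).filterMap
    (fun j => if nums.getD j 0 ∈ nums.take j then some ((nums.idxOf (nums.getD j 0) : Nat) : Int) else none)

lemma idxOf_le_of_getElem (l : List Int) (x : Int) (i : Nat) (h : i < l.length)
    (hx : l[i] = x) : l.idxOf x ≤ i := by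
  by_contra h'
  have h'' : i < l.idxOf x := by omega
  have := List.not_of_lt_findIdx (p := (· == x)) (xs := l) (i := i) (by simpa [List.idxOf] using h'')
  simp at this
  exact this hx

lemma idxOf_eq_of_not_mem_take (l : List Int) (k : Nat) (hk : k < l.length)
    (hnm : l[k] ∉ l.take k) : l.idxOf l[k] = k := by
  have hle : l.idxOf l[k] ≤ k := idxOf_le_of_getElem l _ k hk rfl
  rcases Nat.lt_or_ge (l.idxOf l[k]) k with hlt | hge
  · exfalso
    have hmem : l[k] ∈ l := List.getElem_mem hk
    have h1 : l.idxOf l[k] < l.length := List.idxOf_lt_length_of_mem hmem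
    have h2 : l[l.idxOf l[k]] = l[k] := List.getElem_idxOf h1
    exact hnm (List.mem_take_iff_getElem.mpr ⟨l.idxOf l[k], by omega, h2⟩)
  · omega

-- an element that occurs in nums.take j and again at index j occurs at least twice
lemma two_le_count (nums : List Int) (j : Nat) (hj : j < nums.length)
    (hmem : nums[j] ∈ nums.take j) : 1 < nums.count nums[j] := by
  have hsub : (nums.take (j + 1)).count nums[j] ≤ nums.count nums[j] :=
    (List.take_sublist _ _).count_le _
  rw [List.take_add_one, List.getElem?_eq_getElem hj] at hsub
  simp only [List.count_append] at hsub
  have : 0 < (nums.take j).count nums[j] := List.count_pos_iff.mpr hmem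
  simp at hsub
  omega

lemma optMin_foldl_some (l : List Int) : ∀ a : Int,
    l.foldl optMin (some a) = some (l.foldl min a) := by
  induction l with
  | nil => intro a; rfl
  | cons x xs ih => intro a; simpa [optMin] using ih (min a x)

lemma optMin_foldl_eq_min? (l : List Int) : l.foldl optMin none = l.min? := by
  cases l with
  | nil => rfl
  | cons a as => simpa [optMin, List.min?] using optMin_foldl_some as a

-- characterisation of B's scan loop
lemma enum_findSome (q : Int → Bool) : ∀ (l : List Int) (s : Int),
    (PySem.List.enumerate l s).findSome? (fun p => if q p.2 then some p.1 else none)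
      = (l.findIdx? q).map (fun k => s + (k : Int)) := by
  intro l
  induction l with
  | nil => intro s; simp [PySem.List.enumerate_nil]
  | cons x xs ih =>
    intro s
    rw [PySem.List.enumerate_cons, List.findSome?_cons]
    by_cases hq : q x
    · simp [hq, List.findIdx?_cons]
    · simp only [hq, if_neg, Bool.false_eq_true, not_false_iff]
      rw [ih (s + 1), List.findIdx?_cons]
      simp only [hq]
      cases xs.findIdx? q with
      | none => simp
      | some k => simp; omega

-- A's loop invariant: after the first k iterations the dict holds the first-occurrence
-- index of every element of nums.take k, and min_index is the running optMin of dupIdxs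
lemma A_loop (nums : List Int) : ∀ (k : Nat), k ≤ nums.length →
    (∀ x : Int,
      (((List.range k).map (fun (j : Nat) => (j : Int))).foldl (pvStepA nums)
        (PySem.Dict.empty, none)).1.contains x = decide (x ∈ nums.take k))
    ∧ (∀ x ∈ nums.take k,
      (((List.range k).map (fun (j : Nat) => (j : Int))).foldl (pvStepA nums)
        (PySem.Dict.empty, none)).1.getD x 0 = ((nums.idxOf x : Nat) : Int))
    ∧ (((List.range k).map (fun (j : Nat) => (j : Int))).foldl (pvStepA nums)
        (PySem.Dict.empty, none)).2 = (dupIdxs nums k).foldl optMin none := by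
  intro k
  induction k with
  | zero => intro _; refine ⟨by simp, by simp, by simp [dupIdxs]⟩
  | succ k ih =>
    intro hk
    obtain ⟨h1, h2, h3⟩ := ih (by omega)
    have hklt : k < nums.length := by omega
    have hgetk : nums.getD k 0 = nums[k] := List.getD_eq_getElem nums 0 hklt
    have hrange : (List.range (k+1)).map (fun (j : Nat) => (j : Int))
        = (List.range k).map (fun (j : Nat) => (j : Int)) ++ [(k : Int)] := by
      rw [List.range_succ, List.map_append]; rfl
    have htake : nums.take (k+1) = nums.take k ++ [nums[k]] := by
      rw [List.take_add_one, List.getElem?_eq_getElem hklt]; rfl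
    have hdup : dupIdxs nums (k+1) = dupIdxs nums k ++
        (if nums[k] ∈ nums.take k then [((nums.idxOf nums[k] : Nat) : Int)] else []) := by
      unfold dupIdxs
      rw [List.range_succ, List.filterMap_append]
      simp only [List.filterMap_cons, List.filterMap_nil, hgetk]
      split_ifs <;> rfl
    rw [hrange]
    simp only [List.foldl_append, List.foldl_cons, List.foldl_nil]
    set st := ((List.range k).map (fun (j : Nat) => (j : Int))).foldl (pvStepA nums)
      (PySem.Dict.empty, none)
    by_cases hmem : nums[k] ∈ nums.take k
    · -- duplicate: else-branch of A
      have hcont : st.1.contains (nums.getD k 0) = true := by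
        rw [hgetk, h1]; simpa using hmem
      have hstep : pvStepA nums st (k : Int)
          = (st.1, optMin st.2 (st.1.getD nums[k] 0)) := by
        unfold pvStepA
        simp only [PySem.List.pyGetD_natCast, hcont]
        rw [hgetk]
        cases hm : st.2 <;> simp [optMin]
      rw [hstep]
      refine ⟨?_, ?_, ?_⟩
      · intro x
        rw [h1 x, htake]
        simp only [List.mem_append, List.mem_singleton]
        by_cases hx : x ∈ nums.take k
        · simp [hx]
        · simp [hx]
          intro hxk
          exact absurd (hxk ▸ hmem) hx
      · intro x hx
        rw [htake, List.mem_append, List.mem_singleton] at hx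
        rcases hx with hx | hx
        · exact h2 x hx
        · exact h2 x (hx ▸ hmem)
      · rw [hdup, if_pos hmem, List.foldl_append, List.foldl_cons, List.foldl_nil, ← h3,
          h2 nums[k] hmem]
    · -- fresh element: insert-branch of A
      have hcont : st.1.contains (nums.getD k 0) = false := by
        rw [hgetk, h1]; simpa using hmem
      have hstep : pvStepA nums st (k : Int)
          = (st.1.insert nums[k] (k : Int), st.2) := by
        unfold pvStepA
        simp only [PySem.List.pyGetD_natCast, hcont]
        rw [hgetk]
        simp
      rw [hstep]
      have hidx : nums.idxOf nums[k] = k := idxOf_eq_of_not_mem_take nums k hklt hmem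
      refine ⟨?_, ?_, ?_⟩
      · intro x
        rw [PySem.Dict.contains_insert, h1 x, htake]
        simp only [List.mem_append, List.mem_singleton]
        by_cases hx : x = nums[k]
        · simp [hx]
        · simp [hx, Ne.symm]
      · intro x hx
        rw [htake, List.mem_append, List.mem_singleton] at hx
        by_cases hxk : x = nums[k]
        · subst hxk
          rw [PySem.Dict.getD_insert_self, hidx]
        · rcases hx with hx | hx
          · rw [PySem.Dict.getD_insert_of_ne _ _ _ hxk, h2 x hx]
          · exact absurd hx hxk
      · rw [hdup, if_neg hmem, List.append_nil, h3]

-- A's return value is the optMin-fold of the first-occurrence indices of all duplicates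
lemma A_eq (nums : List Int) :
    find_min_index_of_repeating nums = (dupIdxs nums nums.length).foldl optMin none := by
  unfold find_min_index_of_repeating
  have hlen : PySem.List.len nums = (nums.length : Int) := by simp
  rw [hlen, PySem.List.pyRange_zero_nat]
  exact (A_loop nums nums.length le_rfl).2.2

-- B's return value is the first index whose element occurs more than once
lemma B_eq (nums : List Int) :
    find_min_index_of_repeating_alt nums
      = (nums.findIdx? (fun x => decide (1 < nums.count x))).map (fun (k : Nat) => (k : Int)) := by
  unfold find_min_index_of_repeating_alt
  have hq : ∀ y : Int,
      (nums.foldl (fun d x => d.insert x (d.getD x 0 + 1))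
        (PySem.Dict.empty : PySem.Dict Int Int)).getD y 0 > 1 ↔ 1 < nums.count y := by
    intro y
    rw [PySem.Dict.getD_foldl_insert_add_one, PySem.Dict.getD_empty]
    omega
  have hfun : (fun (p : Int × Int) =>
        if (nums.foldl (fun d x => d.insert x (d.getD x 0 + 1))
            (PySem.Dict.empty : PySem.Dict Int Int)).getD p.2 0 > 1
        then some p.1 else none)
      = (fun (p : Int × Int) =>
        if (fun x => decide (1 < nums.count x)) p.2 then some p.1 else none) := by
    funext p
    by_cases h : 1 < nums.count p.2
    · simp [h, (hq p.2).mpr h]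
    · have h' : ¬ (nums.foldl (fun d x => d.insert x (d.getD x 0 + 1))
          (PySem.Dict.empty : PySem.Dict Int Int)).getD p.2 0 > 1 := fun hc => h ((hq p.2).mp hc)
    
      simp [h, h']
  simp only [hfun]
  have h0 := enum_findSome (fun x => decide (1 < nums.count x)) nums 0
  refine h0.trans ?_
  cases nums.findIdx? (fun x => decide (1 < nums.count x)) <;> simp

-- ===== VERDICT (by name: the statement is the Claim_ definition above) =====
theorem find_min_index_of_repeating_spec : Claim_equal_find_min_index_of_repeating := by
  intro nums _
  unfold Spec_find_min_index_of_repeating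
  rw [A_eq, B_eq, optMin_foldl_eq_min?]
  cases hf : nums.findIdx? (fun x => decide (1 < nums.count x)) with
  | none =>
    rw [List.findIdx?_eq_none_iff] at hf
    have hnil : dupIdxs nums nums.length = [] := by
      unfold dupIdxs
      rw [List.filterMap_eq_nil_iff]
      intro j hj
      rw [List.mem_range] at hj
      have hget : nums.getD j 0 = nums[j] := List.getD_eq_getElem nums 0 hj
      rw [hget]
      split_ifs with hmem
      · exfalso
        have hq := hf nums[j] (List.getElem_mem hj)
        have hc := two_le_count nums j hj hmem
        simp at hq
        omega
      · rfl
    simp [hnil]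
  | some k =>
    obtain ⟨hklt, hpk, hmin⟩ := List.findIdx?_eq_some_iff_getElem.mp hf
    have hcnt : 1 < nums.count nums[k] := by simpa using hpk
    -- nums[k] does not occur before index k
    have hnm : nums[k] ∉ nums.take k := by
      intro hmem
      obtain ⟨i, hi, hx⟩ := List.mem_take_iff_getElem.mp hmem
      have h' := hmin i (by omega)
      simp only [hx] at h'
      simp at h'
      omega
    have hidx : nums.idxOf nums[k] = k := idxOf_eq_of_not_mem_take nums k hklt hnm
    simp only [Option.map_some]
    rw [List.min?_eq_some_iff]
    constructor
    · -- ↑k is a recorded duplicate first-index: find a later occurrence of nums[k]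
      have hc1 : (nums.take (k+1)).count nums[k] = 1 := by
        rw [List.take_add_one, List.getElem?_eq_getElem hklt]
        rw [List.count_append, List.count_eq_zero.mpr hnm]
        simp
      have hsplit : (nums.take (k+1)).count nums[k] + (nums.drop (k+1)).count nums[k]
          = nums.count nums[k] := by
        rw [← List.count_append, List.take_append_drop]
      have hdropmem : nums[k] ∈ nums.drop (k+1) := by
        rw [← List.count_pos_iff]; omega
      obtain ⟨i, hi, hx⟩ := List.getElem_of_mem hdropmem
      rw [List.getElem_drop] at hx
      have hjlt : k + 1 + i < nums.length := by
        have := List.length_drop (l := nums) (i := k+1) ▸ hi; omega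
      unfold dupIdxs
      rw [List.mem_filterMap]
      refine ⟨k + 1 + i, List.mem_range.mpr hjlt, ?_⟩
      have hget : nums.getD (k+1+i) 0 = nums[k] := by
        rw [List.getD_eq_getElem nums 0 hjlt]; exact hx
      rw [hget, if_pos (List.mem_take_iff_getElem.mpr ⟨k, by omega, rfl⟩), hidx]
    · -- every recorded duplicate first-index is ≥ k
      intro b hb
      unfold dupIdxs at hb
      rw [List.mem_filterMap] at hb
      obtain ⟨j, hj, hif⟩ := hb
      rw [List.mem_range] at hj
      have hget : nums.getD j 0 = nums[j] := List.getD_eq_getElem nums 0 hj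
      rw [hget] at hif
      split_ifs at hif with hmem
      · have hb' : b = ((nums.idxOf nums[j] : Nat) : Int) := (Option.some_inj.mp hif).symm
        have hwlt : nums.idxOf nums[j] < nums.length :=
          List.idxOf_lt_length_of_mem (List.getElem_mem hj)
        have hwget : nums[nums.idxOf nums[j]] = nums[j] := List.getElem_idxOf hwlt
        have hcw : 1 < nums.count nums[j] := two_le_count nums j hj hmem
        have hkle : k ≤ nums.idxOf nums[j] := by
          by_contra hlt
          have h' := hmin (nums.idxOf nums[j]) (by omega)
          simp only [hwget] at h'
          simp at h'
          omega
        rw [hb']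
        exact_mod_cast hkle
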